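-- pv_equiv track=rewrite | github.com/andrelplduarte/MeuFinanceiroUAU | services/etl_preprocessamento_uau.py | _filtrar_cabecalhos_repetidos_nao_consecutivos
-- ===== SOURCE A (Python) =====
-- from typing import Any, Dict, List
--
-- def _eh_cabecalho_tabela_principal(s: str) -> bool:
--     t = str(s or "").strip().upper()
--     return "EMP/OBRA" in t and "VENDA" in t and "CLIENTE" in t
--
-- def _filtrar_cabecalhos_repetidos_nao_consecutivos(linhas: List[str]) -> List[str]:
--     """
--     Mantém apenas a primeira ocorrência do cabeçalho EMP/OBRA…VENDA…CLIENTE;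
--     descarta todas as repetições (mesmo com linhas de dados entre elas).
--     """
--     out: List[str] = []
--     header_relevante_visto = False
--     for ln in linhas:
--         if _eh_cabecalho_tabela_principal(ln):
--             if header_relevante_visto:
--                 continue
--             header_relevante_visto = True
--         out.append(ln)
--     return out
-- ===== SOURCE B (Python) =====
-- from typing import List
--
-- def _eh_cabecalho_tabela_principal(s: str) -> bool:
--     t = str(s or "").strip().upper()
--     return "EMP/OBRA" in t and "VENDA" in t and "CLIENTE" in t
--
-- def _filtrar_cabecalhos_repetidos_nao_consecutivos(linhas: List[str]) -> List[str]:
--     # Phase 1: index every main-header position up front.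
--     headers = [i for i, ln in enumerate(linhas) if _eh_cabecalho_tabela_principal(ln)]
--     # Phase 2: every header position except the first is to be dropped.
--     repetidos = set(headers[1:])
--     # Phase 3: keep each line whose position is not a repeated header.
--     return [ln for i, ln in enumerate(linhas) if i not in repetidos]
-- ===== Notes on version B (the rewrite author's own statement) =====
-- stated objective: alternative
-- what changed: Replaced the single stateful pass with a boolean 'header seen' flag by a two-phase plan: first build the list of header positions and a skip-set of all but the first, then filter the enumerated lines against that set.
import Mathlib
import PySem

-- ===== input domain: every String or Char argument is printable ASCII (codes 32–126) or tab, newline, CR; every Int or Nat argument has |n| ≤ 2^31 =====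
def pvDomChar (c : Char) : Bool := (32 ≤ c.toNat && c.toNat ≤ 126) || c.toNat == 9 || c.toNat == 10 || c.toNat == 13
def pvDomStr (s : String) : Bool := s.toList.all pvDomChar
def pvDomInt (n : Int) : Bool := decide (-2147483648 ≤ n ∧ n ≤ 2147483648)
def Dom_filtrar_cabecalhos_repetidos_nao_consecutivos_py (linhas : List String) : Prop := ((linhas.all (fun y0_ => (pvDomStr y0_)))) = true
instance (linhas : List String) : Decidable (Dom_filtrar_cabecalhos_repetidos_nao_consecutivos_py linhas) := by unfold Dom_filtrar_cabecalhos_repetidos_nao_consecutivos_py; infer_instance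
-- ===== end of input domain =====

-- B replaces A's single stateful flag pass by a two-phase header-index/skip-set filter (objective: alternative decomposition).

-- ===== PORT A =====
-- helper _eh_cabecalho_tabela_principal (for a str argument, `s or ""` is `s`; "" strips to "" the same)
def eh_cabecalho_tabela_principal_py (s : String) : Bool :=
  let t := PySem.Str.upper (PySem.Str.strip s)
  PySem.Str.isIn "EMP/OBRA" t && PySem.Str.isIn "VENDA" t && PySem.Str.isIn "CLIENTE" t

def filtrar_cabecalhos_repetidos_nao_consecutivos_py (linhas : List String) : List String :=
  -- loop over linhas carrying (out, header_relevante_visto); `continue` = keep state unchanged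
  (linhas.foldl (fun (st : List String × Bool) ln =>
      if eh_cabecalho_tabela_principal_py ln then
        if st.2 then st
        else (st.1 ++ [ln], true)
      else (st.1 ++ [ln], st.2))
    ([], false)).1

-- ===== PORT B =====
def filtrar_cabecalhos_repetidos_nao_consecutivos_py_alt (linhas : List String) : List String :=
  let headers := ((PySem.List.enumerate linhas 0).filter (fun p => eh_cabecalho_tabela_principal_py p.2)).map (·.1)
  let repetidos : PySem.Set Int := PySem.Set.ofList (headers.drop 1)   -- set(headers[1:])
  ((PySem.List.enumerate linhas 0).filter (fun p => !(PySem.Set.contains repetidos p.1))).map (·.2)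

-- ===== PRECONDITION & SPEC =====
def Spec_filtrar_cabecalhos_repetidos_nao_consecutivos_py (linhas : List String) (out : List String) : Prop := out = filtrar_cabecalhos_repetidos_nao_consecutivos_py_alt linhas
instance (linhas : List String) (out : List String) : Decidable (Spec_filtrar_cabecalhos_repetidos_nao_consecutivos_py linhas out) := by unfold Spec_filtrar_cabecalhos_repetidos_nao_consecutivos_py; infer_instance

-- ===== CLAIM (what is proved, stated in full; the proofs are below) =====
def Claim_equal_filtrar_cabecalhos_repetidos_nao_consecutivos_py : Prop := ∀ (linhas : List String), Dom_filtrar_cabecalhos_repetidos_nao_consecutivos_py linhas → Spec_filtrar_cabecalhos_repetidos_nao_consecutivos_py linhas (filtrar_cabecalhos_repetidos_nao_consecutivos_py linhas)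

-- ===== LEMMAS AND PROOFS =====

-- recursive characterisation of A's loop
def fArec (seen : Bool) : List String → List String
  | [] => []
  | ln :: rest =>
    if eh_cabecalho_tabela_principal_py ln then
      if seen then fArec true rest else ln :: fArec true rest
    else ln :: fArec seen rest

-- header positions of linhas, enumerated from s
def headersOf (s : Int) (linhas : List String) : List Int :=
  ((PySem.List.enumerate linhas s).filter (fun p => eh_cabecalho_tabela_principal_py p.2)).map (·.1)

-- B's filter body, enumerated from s
def bCore (s : Int) (linhas : List String) : List String :=
  ((PySem.List.enumerate linhas s).filter
      (fun p => !(PySem.Set.contains (PySem.Set.ofList ((headersOf s linhas).drop 1)) p.1))).map (·.2)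

theorem foldl_eq_fArec (linhas : List String) (out : List String) (seen : Bool) :
    (linhas.foldl (fun (st : List String × Bool) ln =>
      if eh_cabecalho_tabela_principal_py ln then
        if st.2 then st
        else (st.1 ++ [ln], true)
      else (st.1 ++ [ln], st.2)) (out, seen)).1 = out ++ fArec seen linhas := by
  induction linhas generalizing out seen with
  | nil => simp [fArec]
  | cons ln rest ih =>
    simp only [List.foldl_cons, fArec]
    by_cases h : eh_cabecalho_tabela_principal_py ln = true
    · cases seen <;> simp [h, ih]
    · simp [h, ih]

theorem headersOf_cons (s : Int) (ln : String) (rest : List String) :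
    headersOf s (ln :: rest) =
      if eh_cabecalho_tabela_principal_py ln then s :: headersOf (s + 1) rest
      else headersOf (s + 1) rest := by
  simp only [headersOf, PySem.List.enumerate_cons, List.filter_cons]
  by_cases h : eh_cabecalho_tabela_principal_py ln = true <;> simp [h]

theorem headersOf_lower (s : Int) (linhas : List String) :
    ∀ i ∈ headersOf s linhas, s ≤ i := by
  induction linhas generalizing s with
  | nil => simp [headersOf]
  | cons ln rest ih =>
    intro i hi
    rw [headersOf_cons] at hi
    by_cases h : eh_cabecalho_tabela_principal_py ln = true
    · simp [h] at hi
      rcases hi with rfl | hi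
      · exact le_refl _
      · linarith [ih (s + 1) i hi]
    · simp [h] at hi
      linarith [ih (s + 1) i hi]

-- after the first header was seen, B's filter against ALL header positions keeps exactly the non-header lines
theorem filter_all_headers (linhas : List String) (s : Int) :
    ((PySem.List.enumerate linhas s).filter
        (fun p => !(PySem.Set.contains (PySem.Set.ofList (headersOf s linhas)) p.1))).map (·.2)
      = linhas.filter (fun l => !eh_cabecalho_tabela_principal_py l) := by
  induction linhas generalizing s with
  | nil => simp [headersOf]
  | cons ln rest ih =>
    rw [PySem.List.enumerate_cons, headersOf_cons]
    have hlow := headersOf_lower (s + 1) rest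
    have hs : s ∉ headersOf (s + 1) rest := fun hmem => by linarith [hlow s hmem]
    by_cases h : eh_cabecalho_tabela_principal_py ln = true
    · simp only [h, if_pos, List.filter_cons]
      have htail : ∀ p ∈ PySem.List.enumerate rest (s + 1),
          (fun p : Int × String =>
              !(PySem.Set.contains (PySem.Set.ofList (s :: headersOf (s + 1) rest)) p.1)) p
            = (fun p : Int × String =>
              !(PySem.Set.contains (PySem.Set.ofList (headersOf (s + 1) rest)) p.1)) p := by
        intro p hp
        rcases (PySem.List.mem_enumerate_iff rest (s + 1) p).1 hp with ⟨k, hk, rfl⟩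
        simp only [PySem.Set.contains_eq_listContains]
        simp only [List.contains_eq_mem, List.mem_cons, PySem.Set.mem_ofList]
        have : (s : Int) + 1 + k ≠ s := by omega
        simp [this]
      have hhead : (PySem.Set.contains (PySem.Set.ofList (s :: headersOf (s + 1) rest)) s) = true := by
        simp [PySem.Set.contains_eq_listContains, PySem.Set.mem_ofList]
      rw [List.filter_congr htail]
      simp only [hhead, Bool.not_true, Bool.false_eq_true, if_false]
      exact ih (s + 1)
    · simp only [h, Bool.false_eq_true, if_false, List.filter_cons]
      have hhead : (PySem.Set.contains (PySem.Set.ofList (headersOf (s + 1) rest)) s) = false := by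
        simp [PySem.Set.contains_eq_listContains, PySem.Set.mem_ofList, hs]
      simp only [hhead, Bool.not_false, if_pos, List.map_cons]
      rw [ih (s + 1)]

-- with the flag set, A keeps exactly the non-header lines
theorem fArec_true_eq_filter (linhas : List String) :
    fArec true linhas = linhas.filter (fun l => !eh_cabecalho_tabela_principal_py l) := by
  induction linhas with
  | nil => simp [fArec]
  | cons x xs ihx =>
    by_cases hx : eh_cabecalho_tabela_principal_py x = true <;>
      simp [fArec, hx, ihx]

theorem bCore_eq_fArec (linhas : List String) (s : Int) :
    bCore s linhas = fArec false linhas := by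
  induction linhas generalizing s with
  | nil => simp [bCore, fArec]
  | cons ln rest ih =>
    have hlow := headersOf_lower (s + 1) rest
    have hs : s ∉ headersOf (s + 1) rest := fun hmem => by linarith [hlow s hmem]
    rw [bCore, PySem.List.enumerate_cons, headersOf_cons, fArec]
    by_cases h : eh_cabecalho_tabela_principal_py ln = true
    · -- first header at position s: skip-set = all later header positions
      simp only [h, if_pos, List.drop_one, List.tail_cons, List.filter_cons, Bool.false_eq_true,
        if_false]
      have hsc : (PySem.Set.contains (PySem.Set.ofList (headersOf (s + 1) rest)) s) = false := by
        simp [PySem.Set.contains_eq_listContains, PySem.Set.mem_ofList, hs]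
      simp only [hsc, Bool.not_false, if_pos, List.map_cons]
      rw [filter_all_headers rest (s + 1), fArec_true_eq_filter]
    · -- not a header: skip-set of the cons is the shifted skip-set of the tail
      simp only [h, Bool.false_eq_true, if_false, List.filter_cons]
      have hdrop : s ∉ (headersOf (s + 1) rest).tail := fun hmem => by
        linarith [hlow s (List.tail_subset _ hmem)]
      have hsc : (PySem.Set.contains (PySem.Set.ofList ((headersOf (s + 1) rest).drop 1)) s) = false := by
        simp [PySem.Set.contains_eq_listContains, PySem.Set.mem_ofList, List.drop_one, hdrop]
      simp only [hsc, Bool.not_false, if_pos, List.map_cons]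
      have htl := ih (s + 1)
      rw [bCore] at htl
      rw [htl]

-- ===== VERDICT (by name: the statement is the Claim_ definition above) =====
theorem filtrar_cabecalhos_repetidos_nao_consecutivos_py_spec : Claim_equal_filtrar_cabecalhos_repetidos_nao_consecutivos_py := by
  intro linhas _
  unfold Spec_filtrar_cabecalhos_repetidos_nao_consecutivos_py
  unfold filtrar_cabecalhos_repetidos_nao_consecutivos_py filtrar_cabecalhos_repetidos_nao_consecutivos_py_alt
  rw [foldl_eq_fArec, List.nil_append, ← bCore_eq_fArec linhas 0]
  rfl
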